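-- pv_equiv track=rewrite | github.com/khloe1425/luyenthihsgioi | THCS/2022_2023/HoaBinh_2223/Bai4/TOWER.py | min_towers
-- ===== SOURCE A (Python) =====
-- import bisect
--
-- def min_towers(n, blocks):
--     towers = []
--
--     for block in blocks:
--         # Tìm vị trí thích hợp để thay thế hoặc tạo tháp mới
--         pos = bisect.bisect_right(towers, block)
--
--         if pos < len(towers):
--             towers[pos] = block
--         else:
--             towers.append(block)
--
--     return len(towers)
-- ===== SOURCE B (Python) =====
-- def min_towers(n, blocks):
--     # O(n^2) DP: longest non-decreasing subsequence length via per-element dp values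
--     dp = []  # list of (value, length of longest non-decreasing subsequence ending at it)
--     best_overall = 0
--     for x in blocks:
--         best = 0
--         for v, d in dp:
--             if v <= x and d > best:
--                 best = d
--         dp.append((x, best + 1))
--         if best + 1 > best_overall:
--             best_overall = best + 1
--     return best_overall
-- ===== Notes on version B (the rewrite author's own statement) =====
-- stated objective: alternative
-- what changed: Replaced patience-sorting (bisect_right into a maintained tails list) by the classic O(n^2) dynamic program for the longest non-decreasing subsequence: dp value per element plus a running maximum.
import Mathlib
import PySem

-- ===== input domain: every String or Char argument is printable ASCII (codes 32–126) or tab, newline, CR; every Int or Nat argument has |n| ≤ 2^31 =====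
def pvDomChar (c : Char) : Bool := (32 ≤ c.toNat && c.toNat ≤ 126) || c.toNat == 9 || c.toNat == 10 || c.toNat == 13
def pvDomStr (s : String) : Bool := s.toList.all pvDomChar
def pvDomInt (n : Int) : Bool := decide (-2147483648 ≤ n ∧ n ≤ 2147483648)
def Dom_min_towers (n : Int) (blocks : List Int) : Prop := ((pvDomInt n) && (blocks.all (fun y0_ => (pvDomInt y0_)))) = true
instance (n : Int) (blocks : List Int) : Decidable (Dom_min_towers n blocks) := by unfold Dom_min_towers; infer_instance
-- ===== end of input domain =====

-- B replaces A's patience-sorting tails list (bisect + replace) by the classic O(n^2)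
-- longest-non-decreasing-subsequence DP over (value, dp) pairs: objective 'alternative'.

-- ===== PORT A =====
-- bisect.bisect_right: number of elements ≤ x; exact on sorted lists, and `towers` is
-- kept sorted by the algorithm (the insertion point of a binary search on a sorted list).
def pvBisectRight (a : List Int) (x : Int) : Nat := a.countP (fun t => t ≤ x)

def pvTowerStep (towers : List Int) (block : Int) : List Int :=
  let pos := pvBisectRight towers block
  if pos < towers.length then towers.set pos block else towers ++ [block]

def min_towers (n : Int) (blocks : List Int) : Int :=
  ((blocks.foldl pvTowerStep []).length : Int)

-- ===== PORT B =====
-- inner loop of Source B: best = max dp value among processed pairs with value ≤ x (0 if none)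
def pvBestF (x : Int) (b : Int) (p : Int × Int) : Int := if p.1 ≤ x ∧ b < p.2 then p.2 else b

def pvBest (dp : List (Int × Int)) (x : Int) : Int := dp.foldl (pvBestF x) 0

def pvAltStep (st : List (Int × Int) × Int) (x : Int) : List (Int × Int) × Int :=
  let best := pvBest st.1 x
  (st.1 ++ [(x, best + 1)], if st.2 < best + 1 then best + 1 else st.2)

def min_towers_alt (n : Int) (blocks : List Int) : Int :=
  (blocks.foldl pvAltStep ([], 0)).2

-- ===== PRECONDITION & SPEC =====
def Spec_min_towers (n : Int) (blocks : List Int) (out : Int) : Prop := out = min_towers_alt n blocks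
instance (n : Int) (blocks : List Int) (out : Int) : Decidable (Spec_min_towers n blocks out) := by unfold Spec_min_towers; infer_instance

-- ===== CLAIM (what is proved, stated in full; the proofs are below) =====
def Claim_equal_min_towers : Prop := ∀ (n : Int) (blocks : List Int), Dom_min_towers n blocks → Spec_min_towers n blocks (min_towers n blocks)

-- ===== LEMMAS AND PROOFS =====

-- Invariant tying A's tails list to B's state (D = processed (value,dp) pairs, M = best so far):
-- M is the number of towers, and towers[k] ≤ y iff some processed value ≤ y has dp ≥ k+1.
def pvInv (towers : List Int) (D : List (Int × Int)) (M : Int) : Prop :=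
  M = (towers.length : Int) ∧
  ∀ (k : Nat) (y : Int),
    (∃ h : k < towers.length, towers[k]'h ≤ y) ↔ ∃ p ∈ D, p.1 ≤ y ∧ (k : Int) + 1 ≤ p.2

theorem pvBestGo (x : Int) : ∀ (D : List (Int × Int)) (b : Int),
    b ≤ D.foldl (pvBestF x) b
    ∧ (D.foldl (pvBestF x) b = b ∨ ∃ p ∈ D, p.1 ≤ x ∧ p.2 = D.foldl (pvBestF x) b)
    ∧ ∀ p ∈ D, p.1 ≤ x → p.2 ≤ D.foldl (pvBestF x) b := by
  intro D
  induction D with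
  | nil => intro b; simp
  | cons q D ih =>
    intro b
    obtain ⟨ih1, ih2, ih3⟩ := ih (pvBestF x b q)
    have hge : b ≤ pvBestF x b q := by unfold pvBestF; split <;> omega
    refine ⟨by simpa [List.foldl_cons] using le_trans hge ih1, ?_, ?_⟩
    · rcases ih2 with h | ⟨p, hp, h1, h2⟩
      · by_cases hc : q.1 ≤ x ∧ b < q.2
        · right
          refine ⟨q, by simp, hc.1, ?_⟩
          rw [List.foldl_cons, h]
          simp [pvBestF, hc]
        · left
          rw [List.foldl_cons, h]
          simp [pvBestF, hc]
      · right; exact ⟨p, by simp [hp], h1, h2⟩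
    · intro p hp hpx
      rcases List.mem_cons.mp hp with h | h
      · subst h
        have : p.2 ≤ pvBestF x b p := by unfold pvBestF; split <;> omega
        exact le_trans this ih1
      · exact ih3 p h hpx

theorem pvBest_nonneg (D : List (Int × Int)) (x : Int) : 0 ≤ pvBest D x :=
  (pvBestGo x D 0).1

theorem pvBest_le_iff (D : List (Int × Int)) (x : Int) (k : Nat) :
    ((k : Int) + 1 ≤ pvBest D x) ↔ ∃ p ∈ D, p.1 ≤ x ∧ (k : Int) + 1 ≤ p.2 := by
  obtain ⟨h1, h2, h3⟩ := pvBestGo x D 0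
  constructor
  · intro hk
    rcases h2 with h | ⟨p, hp, hpx, hpe⟩
    · exfalso; simp only [pvBest] at hk; omega
    · exact ⟨p, hp, hpx, by simp only [pvBest] at hk; omega⟩
  · rintro ⟨p, hp, hpx, hpe⟩
    exact le_trans hpe (h3 p hp hpx)

theorem pvCountP_eq (x : Int) : ∀ (l : List Int) (m : Nat), m ≤ l.length →
    (∀ (k : Nat) (hk : k < l.length), (l[k]'hk ≤ x ↔ k < m)) →
    l.countP (fun t => t ≤ x) = m := by
  intro l
  induction l with
  | nil => intro m hm _; simp at hm; simp [hm]
  | cons a t ih =>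
    intro m hm h
    rw [List.countP_cons]
    cases m with
    | zero =>
      have ha : ¬ a ≤ x := by
        intro hax
        have h0 := h 0 (by simp)
        simp only [List.getElem_cons_zero] at h0
        exact absurd (h0.mp hax) (by omega)
      rw [ih 0 (by omega) ?_]
      · simp [ha]
      · intro k hk
        have := h (k + 1) (by simp; omega)
        simpa using this
    | succ m' =>
      have ha : a ≤ x := by
        have h0 := h 0 (by simp)
        simp only [List.getElem_cons_zero] at h0
        exact h0.mpr (by omega)
      rw [ih m' (by simp at hm; omega) ?_]
      · simp [ha]
      · intro k hk
        have := h (k + 1) (by simp; omega)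
        simp at this; constructor
        · intro hx; omega
        · intro hx; exact this.mpr (by omega)

theorem pvStep_inv (towers : List Int) (D : List (Int × Int)) (M x : Int)
    (h : pvInv towers D M) :
    pvInv (pvTowerStep towers x) (pvAltStep (D, M) x).1 (pvAltStep (D, M) x).2 := by
  obtain ⟨hM, hIff⟩ := h
  have hb0 : 0 ≤ pvBest D x := pvBest_nonneg D x
  set b := pvBest D x with hbdef
  set m : Nat := b.toNat with hmdef
  have hbm : (m : Int) = b := Int.toNat_of_nonneg hb0
  have hchar : ∀ k : Nat, ((k : Int) + 1 ≤ b) ↔ ∃ p ∈ D, p.1 ≤ x ∧ (k : Int) + 1 ≤ p.2 :=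
    fun k => pvBest_le_iff D x k
  have hmle : m ≤ towers.length := by
    rcases Nat.eq_zero_or_pos m with h0 | h0
    · omega
    · have hh : ((m - 1 : Nat) : Int) + 1 ≤ b := by omega
      obtain ⟨hlt, _⟩ := (hIff (m - 1) x).mpr ((hchar (m - 1)).mp hh)
      omega
  have hidx : ∀ (k : Nat) (hk : k < towers.length), (towers[k]'hk ≤ x ↔ k < m) := by
    intro k hk
    constructor
    · intro hkx
      have h1 := (hchar k).mpr ((hIff k x).mp ⟨hk, hkx⟩)
      omega
    · intro hkm
      have h1 : (k : Int) + 1 ≤ b := by omega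
      obtain ⟨h', hx'⟩ := (hIff k x).mpr ((hchar k).mp h1)
      exact hx'
  have hpos : pvBisectRight towers x = m := pvCountP_eq x towers m hmle hidx
  have hA : pvTowerStep towers x
      = if m < towers.length then towers.set m x else towers ++ [x] := by
    unfold pvTowerStep; rw [hpos]
  have hB1 : (pvAltStep (D, M) x).1 = D ++ [(x, b + 1)] := rfl
  have hB2 : (pvAltStep (D, M) x).2 = if M < b + 1 then b + 1 else M := rfl
  rw [hA, hB1, hB2]
  by_cases hcase : m < towers.length
  · -- replace towers[m] by x
    rw [if_pos hcase]
    constructor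
    · have hnot : ¬ M < b + 1 := by omega
      rw [if_neg hnot, List.length_set]; exact hM
    · intro k y
      by_cases hkm : k = m
      · subst hkm
        constructor
        · rintro ⟨hlt, hle⟩
          have hlt' : m < towers.length := by simpa [List.length_set] using hlt
          have hx : (towers.set m x)[m]'hlt = x := List.getElem_set_self _
          rw [hx] at hle
          exact ⟨(x, b + 1), by simp, hle, by omega⟩
        · rintro ⟨p, hp, hpy, hpk⟩
          have hlen : m < (towers.set m x).length := by simpa [List.length_set] using hcase
          have hx : (towers.set m x)[m]'hlen = x := List.getElem_set_self _
          rcases List.mem_append.mp hp with hpD | hpx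
          · obtain ⟨hlt, hle⟩ := (hIff m y).mpr ⟨p, hpD, hpy, hpk⟩
            have hxm : ¬ towers[m]'hlt ≤ x := by rw [hidx m hlt]; omega
            exact ⟨hlen, by rw [hx]; omega⟩
          · rw [List.mem_singleton] at hpx
            subst hpx
            dsimp only at hpy
            exact ⟨hlen, by rw [hx]; omega⟩
      · constructor
        · rintro ⟨hlt, hle⟩
          have hlt' : k < towers.length := by simpa [List.length_set] using hlt
          have hx : (towers.set m x)[k]'hlt = towers[k]'hlt' :=
            List.getElem_set_ne (by omega) _
          rw [hx] at hle
          obtain ⟨p, hp, hpy, hpk⟩ := (hIff k y).mp ⟨hlt', hle⟩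
          exact ⟨p, List.mem_append_left _ hp, hpy, hpk⟩
        · rintro ⟨p, hp, hpy, hpk⟩
          rcases List.mem_append.mp hp with hpD | hpx
          · obtain ⟨hlt, hle⟩ := (hIff k y).mpr ⟨p, hpD, hpy, hpk⟩
            have hlt' : k < (towers.set m x).length := by simpa [List.length_set] using hlt
            have hx : (towers.set m x)[k]'hlt' = towers[k]'hlt :=
              List.getElem_set_ne (by omega) _
            exact ⟨hlt', by rw [hx]; exact hle⟩
          · rw [List.mem_singleton] at hpx
            subst hpx
            dsimp only at hpy hpk
            have hklt : k < m := by omega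
            have hlt : k < towers.length := by omega
            have hkx : towers[k]'hlt ≤ x := (hidx k hlt).mpr hklt
            have hlt' : k < (towers.set m x).length := by simpa [List.length_set] using hlt
            have hx : (towers.set m x)[k]'hlt' = towers[k]'hlt :=
              List.getElem_set_ne (by omega) _
            exact ⟨hlt', by rw [hx]; omega⟩
  · -- append x
    have hmeq : m = towers.length := by omega
    rw [if_neg hcase]
    constructor
    · have hlt : M < b + 1 := by omega
      rw [if_pos hlt]
      simp [List.length_append]
      omega
    · intro k y
      constructor
      · rintro ⟨hlt, hle⟩
        have hlen : k < towers.length + 1 := by simpa [List.length_append] using hlt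
        by_cases hk : k < towers.length
        · have hx : (towers ++ [x])[k]'hlt = towers[k]'hk := List.getElem_append_left hk
          rw [hx] at hle
          obtain ⟨p, hp, hpy, hpk⟩ := (hIff k y).mp ⟨hk, hle⟩
          exact ⟨p, List.mem_append_left _ hp, hpy, hpk⟩
        · have hke : k = towers.length := by omega
          subst hke
          have hx : (towers ++ [x])[towers.length]'hlt = x := by
            simp
          rw [hx] at hle
          exact ⟨(x, b + 1), by simp, hle, by omega⟩
      · rintro ⟨p, hp, hpy, hpk⟩
        have hlen : k < (towers ++ [x]).length ↔ k < towers.length + 1 := by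
          simp [List.length_append]
        rcases List.mem_append.mp hp with hpD | hpx
        · obtain ⟨hlt, hle⟩ := (hIff k y).mpr ⟨p, hpD, hpy, hpk⟩
          have hlt' : k < (towers ++ [x]).length := hlen.mpr (by omega)
          have hx : (towers ++ [x])[k]'hlt' = towers[k]'hlt := List.getElem_append_left hlt
          exact ⟨hlt', by rw [hx]; exact hle⟩
        · rw [List.mem_singleton] at hpx
          subst hpx
          dsimp only at hpy hpk
          have hkle : k ≤ m := by omega
          have hlt' : k < (towers ++ [x]).length := hlen.mpr (by omega)
          by_cases hk : k < towers.length
          · have hx : (towers ++ [x])[k]'hlt' = towers[k]'hk := List.getElem_append_left hk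
            have hkx : towers[k]'hk ≤ x := (hidx k hk).mpr (by omega)
            exact ⟨hlt', by rw [hx]; omega⟩
          · have hke : k = towers.length := by omega
            subst hke
            have hx : (towers ++ [x])[towers.length]'hlt' = x := by
              simp
            exact ⟨hlt', by rw [hx]; omega⟩

theorem pvFold_inv : ∀ (bs : List Int) (towers : List Int) (D : List (Int × Int)) (M : Int),
    pvInv towers D M →
    pvInv (bs.foldl pvTowerStep towers) (bs.foldl pvAltStep (D, M)).1
      (bs.foldl pvAltStep (D, M)).2 := by
  intro bs
  induction bs with
  | nil => intro towers D M h; simpa using h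
  | cons x bs ih =>
    intro towers D M h
    have hstep := pvStep_inv towers D M x h
    simpa [List.foldl_cons] using ih (pvTowerStep towers x) (pvAltStep (D, M) x).1
      (pvAltStep (D, M) x).2 hstep

-- ===== VERDICT (by name: the statement is the Claim_ definition above) =====
theorem min_towers_spec : Claim_equal_min_towers := by
  intro n blocks _
  unfold Spec_min_towers min_towers min_towers_alt
  have h0 : pvInv [] [] 0 := by
    refine ⟨by simp, fun k y => ?_⟩
    simp
  exact (pvFold_inv blocks [] [] 0 h0).1.symm
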